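-- pv_equiv track=rewrite | github.com/kazuhiko1979/edabit | Number Pairs.py | number_pairs
-- ===== SOURCE A (Python) =====
-- import collections
-- import math
--
-- def number_pairs(txt):
--
--     txt = list(txt.split(' ')[1:])
--     c = collections.Counter(txt)
--
--     count = 0
--
--     for key, value in c.items():
--         if value > 1:
--             value = math.floor(value / 2)
--             count += value
--     return count
-- ===== SOURCE B (Python) =====
-- def number_pairs(txt):
--     count = 0
--     seen = set()
--     for tok in txt.split(' ')[1:]:
--         if tok in seen:
--             seen.discard(tok)
--             count += 1
--         else:
--             seen.add(tok)
--     return count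
-- ===== Notes on version B (the rewrite author's own statement) =====
-- stated objective: alternative
-- what changed: Replaced the Counter build plus a second loop of floor-divisions by a single pass that keeps a set of currently-unpaired tokens and increments the count each time a token completes a pair.
import Mathlib
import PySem

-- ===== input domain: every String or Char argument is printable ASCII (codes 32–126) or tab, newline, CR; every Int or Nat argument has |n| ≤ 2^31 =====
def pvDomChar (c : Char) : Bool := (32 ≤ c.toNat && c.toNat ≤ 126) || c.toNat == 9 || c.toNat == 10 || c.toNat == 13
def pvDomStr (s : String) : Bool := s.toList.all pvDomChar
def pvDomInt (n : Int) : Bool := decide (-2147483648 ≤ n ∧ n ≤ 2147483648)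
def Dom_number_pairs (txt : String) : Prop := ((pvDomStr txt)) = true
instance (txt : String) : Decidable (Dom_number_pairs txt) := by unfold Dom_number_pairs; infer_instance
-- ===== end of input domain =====

-- B replaces the Counter + floor-division loop by a single pass with a set of unpaired tokens (alternative decomposition, same cost).
-- ===== PORT A =====
-- Port of A: split on ' ', drop the first token, Counter, then sum value//2 over counts > 1.
-- math.floor(value / 2) on a positive int value is ported as floor division (exact whenever the
-- count is below 2^53, where halving via float is exact).
def number_pairs (txt : String) : Int :=
  let toks := PySem.List.slice ((PySem.Str.split? txt " ").getD []) (some 1) none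
  let c := PySem.Dict.counter toks
  c.items.foldl (fun count kv =>
    if kv.2 > 1 then count + PySem.Int.floordiv kv.2 2 else count) 0

-- ===== PORT B =====
-- B: one pass keeping a set of currently-unpaired tokens; completing a pair bumps the count.
def number_pairs_alt (txt : String) : Int :=
  let toks := PySem.List.slice ((PySem.Str.split? txt " ").getD []) (some 1) none
  (toks.foldl
    (fun (st : PySem.Set String × Int) tok =>
      if PySem.Set.contains st.1 tok then (PySem.Set.discard st.1 tok, st.2 + 1)
      else (PySem.Set.add st.1 tok, st.2))
    (PySem.Set.empty, 0)).2

-- ===== PRECONDITION & SPEC =====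
def Spec_number_pairs (txt : String) (out : Int) : Prop := out = number_pairs_alt txt
instance (txt : String) (out : Int) : Decidable (Spec_number_pairs txt out) := by unfold Spec_number_pairs; infer_instance

-- ===== CLAIM (what is proved, stated in full; the proofs are below) =====
def Claim_equal_number_pairs : Prop := ∀ (txt : String), Dom_number_pairs txt → Spec_number_pairs txt (number_pairs txt)

-- ===== LEMMAS AND PROOFS =====

-- B's fold step, named for the lemmas (definitionally the lambda in number_pairs_alt).
def npStep (st : PySem.Set String × Int) (tok : String) : PySem.Set String × Int :=
  if PySem.Set.contains st.1 tok then (PySem.Set.discard st.1 tok, st.2 + 1)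
  else (PySem.Set.add st.1 tok, st.2)

lemma discard_length_of_mem {s : List String} {x : String} (hn : s.Nodup) (hx : x ∈ s) :
    (PySem.Set.discard s x).length + 1 = s.length := by
  have h : PySem.Set.discard s x = s.erase x := by
    rw [hn.erase_eq_filter]; simp [PySem.Set.discard, bne]
  have hl := List.length_pos_of_mem hx
  rw [h, List.length_erase_of_mem hx]; omega

lemma nodup_add {s : List String} (x : String) (hn : s.Nodup) : (PySem.Set.add s x).Nodup := by
  unfold PySem.Set.add
  split
  · exact hn
  · next h => simp_all [List.nodup_append]; exact fun a ha he => h (he ▸ ha)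

lemma nodup_npStep_fold (l : List String) (s : PySem.Set String) (c : Int) (hn : s.Nodup) :
    (l.foldl npStep (s, c)).1.Nodup := by
  induction l generalizing s c with
  | nil => exact hn
  | cons x l ih =>
    simp only [List.foldl_cons, npStep]
    split
    · exact ih _ _ (PySem.Set.nodup_discard _ _ hn)
    · exact ih _ _ (nodup_add x hn)

lemma npStep_fold_len (l : List String) (s : PySem.Set String) (c : Int) (hn : s.Nodup) :
    2 * (l.foldl npStep (s, c)).2 + ((l.foldl npStep (s, c)).1.length : Int)
      = 2 * c + (s.length : Int) + (l.length : Int) := by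
  induction l generalizing s c with
  | nil => simp
  | cons x l ih =>
    simp only [List.foldl_cons, npStep]
    split
    · next h =>
      have hx : x ∈ s := (PySem.Set.contains_iff s x).mp h
      have hd := discard_length_of_mem hn hx
      rw [ih _ _ (PySem.Set.nodup_discard _ _ hn)]
      simp only [List.length_cons]
      push_cast
      omega
    · next h =>
      have hx : x ∉ s := fun hm => h ((PySem.Set.contains_iff s x).mpr hm)
      have ha : (PySem.Set.add s x).length = s.length + 1 := by
        unfold PySem.Set.add; rw [if_neg h]; simp
      rw [ih _ _ (nodup_add x hn), ha]
      simp only [List.length_cons]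
      push_cast
      omega

lemma npStep_fold_mem (l : List String) (s : PySem.Set String) (c : Int) (k : String) :
    k ∈ (l.foldl npStep (s, c)).1 ↔ (l.count k + (if k ∈ s then 1 else 0)) % 2 = 1 := by
  induction l generalizing s c with
  | nil => simp only [List.foldl_nil, List.count_nil, Nat.zero_add]; split <;> simp_all
  | cons x l ih =>
    simp only [List.foldl_cons, npStep]
    split
    · next h =>
      have hx : x ∈ s := (PySem.Set.contains_iff s x).mp h
      rw [ih]
      by_cases hk : k = x
      · subst hk
        simp [PySem.Set.mem_discard, hx, List.count_cons_self]
        omega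
      · have hk' : x ≠ k := fun h => hk h.symm
        simp [PySem.Set.mem_discard, hk, hk']
    · next h =>
      have hx : x ∉ s := fun hm => h ((PySem.Set.contains_iff s x).mpr hm)
      rw [ih]
      by_cases hk : k = x
      · subst hk
        simp [hx, List.count_cons_self]
      · have hk' : x ≠ k := fun h => hk h.symm
        simp [PySem.Set.mem_add, hk, hk']

lemma filter_length_eq_sum (p : String → Bool) (ks : List String) :
    (ks.filter p).length = (ks.map (fun k => if p k then 1 else 0)).sum := by
  induction ks with
  | nil => rfl
  | cons x ks ih =>
    simp only [List.filter_cons, List.map_cons, List.sum_cons]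
    split <;> simp [ih]
    all_goals omega

lemma foldA_eq_sum (l : List String) (ks : List String) (c : Int) :
    ks.foldl (fun c k => if ((l.count k : Int)) > 1 then c + PySem.Int.floordiv (l.count k) 2 else c) c
      = c + ((ks.map (fun k => l.count k / 2)).sum : Int) := by
  induction ks generalizing c with
  | nil => simp
  | cons x ks ih =>
    simp only [List.foldl_cons, List.map_cons, List.sum_cons]
    split
    · next h =>
      rw [ih]
      have := PySem.Int.floordiv_natCast (l.count x) 2
      push_cast at this ⊢
      omega
    · next h =>
      rw [ih]
      have hc : l.count x ≤ 1 := by exact_mod_cast by omega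
      have : l.count x / 2 = 0 := by omega
      rw [this]
      push_cast
      ring

lemma sum_count_ofList (l : List String) :
    ((PySem.Set.ofList l).map (fun k => l.count k)).sum = l.length := by
  have hp : (PySem.Set.ofList l).Perm l.dedup := by
    rw [List.perm_ext_iff_of_nodup (PySem.Set.nodup_ofList l) l.nodup_dedup]
    intro a
    rw [PySem.Set.mem_ofList, List.mem_dedup]
  calc ((PySem.Set.ofList l).map (fun k => l.count k)).sum
      = (l.dedup.map (fun k => l.count k)).sum := (hp.map _).sum_eq
    _ = l.length := by simpa [List.count] using List.sum_map_count_dedup_eq_length l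

lemma number_pairs_core (l : List String) :
    (PySem.Dict.counter l).items.foldl (fun count kv =>
        if kv.2 > 1 then count + PySem.Int.floordiv kv.2 2 else count) 0
      = (l.foldl npStep (PySem.Set.empty, 0)).2 := by
  have hA : (PySem.Dict.counter l).items.foldl (fun count kv =>
        if kv.2 > 1 then count + PySem.Int.floordiv kv.2 2 else count) 0
      = (((PySem.Set.ofList l).map (fun k => l.count k / 2)).sum : Int) := by
    rw [PySem.Dict.items_counter, List.foldl_map, foldA_eq_sum l _ 0, zero_add]
  have hlen := npStep_fold_len l PySem.Set.empty 0 List.nodup_nil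
  have he : (PySem.Set.empty : PySem.Set String).length = 0 := rfl
  rw [he] at hlen
  have hnd : (l.foldl npStep ((PySem.Set.empty : PySem.Set String), 0)).1.Nodup :=
    nodup_npStep_fold l PySem.Set.empty 0 List.nodup_nil
  have hmem : ∀ a, a ∈ (l.foldl npStep ((PySem.Set.empty : PySem.Set String), 0)).1 ↔
      l.count a % 2 = 1 := by
    intro a
    rw [npStep_fold_mem]
    simp [PySem.Set.empty]
  have hperm : (l.foldl npStep ((PySem.Set.empty : PySem.Set String), 0)).1.Perm
      ((PySem.Set.ofList l).filter (fun k => decide (l.count k % 2 = 1))) := by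
    rw [List.perm_ext_iff_of_nodup hnd ((PySem.Set.nodup_ofList l).filter _)]
    intro a
    rw [hmem, List.mem_filter, PySem.Set.mem_ofList]
    simp only [decide_eq_true_eq]
    constructor
    · intro h
      have hpos : 0 < l.count a := by omega
      exact ⟨List.count_pos_iff.mp hpos, h⟩
    · intro ⟨_, h1⟩; exact h1
  have hflen : (l.foldl npStep ((PySem.Set.empty : PySem.Set String), 0)).1.length
      = ((PySem.Set.ofList l).map (fun k => l.count k % 2)).sum := by
    rw [hperm.length_eq, filter_length_eq_sum]
    congr 1
    apply List.map_congr_left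
    intro k _
    by_cases h : l.count k % 2 = 1 <;> simp [h]
    all_goals omega
  have hsum : 2 * ((PySem.Set.ofList l).map (fun k => l.count k / 2)).sum
      + ((PySem.Set.ofList l).map (fun k => l.count k % 2)).sum = l.length := by
    have hc := sum_count_ofList l
    rw [← hc, ← List.sum_map_mul_left, ← List.sum_map_add]
    congr 1
    apply List.map_congr_left
    intro k _
    omega
  rw [hA]
  omega

-- ===== VERDICT (by name: the statement is the Claim_ definition above) =====
theorem number_pairs_spec : Claim_equal_number_pairs := by
  intro txt _
  unfold Spec_number_pairs number_pairs number_pairs_alt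
  exact number_pairs_core _
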